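-- pv_equiv track=rewrite | github.com/rafalimma/Inteligencia-artificial | ed03/codigo/AG-base.py | inicializacao_heuristica
-- ===== SOURCE A (Python) =====
-- def inicializacao_heuristica(n_pop, pesos, capacidade):
--     populacao = []
--     for _ in range(n_pop):
--         ind = [0] * len(pesos)
--         capacidade_restante = capacidade
--         indices = sorted(range(len(pesos)), key=lambda i: pesos[i])  # itens mais leves primeiro
--         for i in indices:
--             if pesos[i] <= capacidade_restante:
--                 ind[i] = 1
--                 capacidade_restante -= pesos[i]
--         populacao.append(ind)
--     return populacao
-- ===== SOURCE B (Python) =====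
-- def inicializacao_heuristica(n_pop, pesos, capacidade):
--     # Build the greedy lightest-first individual ONCE (running prefix sum with
--     # early break instead of a remaining-capacity conditional), then copy it.
--     indices = sorted(range(len(pesos)), key=lambda i: pesos[i])
--     base = [0] * len(pesos)
--     s = 0
--     for i in indices:
--         s += pesos[i]
--         if s > capacidade:
--             break
--         base[i] = 1
--     return [list(base) for _ in range(n_pop)]
-- ===== Notes on version B (the rewrite author's own statement) =====
-- stated objective: faster
-- what changed: B computes the greedy individual once via a running prefix sum with an early break (valid because the weights are scanned in nondecreasing order, so the first item that does not fit ends the fill) and returns n_pop copies, instead of A's per-individual re-sort and remaining-capacity conditional loop.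
import Mathlib
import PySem

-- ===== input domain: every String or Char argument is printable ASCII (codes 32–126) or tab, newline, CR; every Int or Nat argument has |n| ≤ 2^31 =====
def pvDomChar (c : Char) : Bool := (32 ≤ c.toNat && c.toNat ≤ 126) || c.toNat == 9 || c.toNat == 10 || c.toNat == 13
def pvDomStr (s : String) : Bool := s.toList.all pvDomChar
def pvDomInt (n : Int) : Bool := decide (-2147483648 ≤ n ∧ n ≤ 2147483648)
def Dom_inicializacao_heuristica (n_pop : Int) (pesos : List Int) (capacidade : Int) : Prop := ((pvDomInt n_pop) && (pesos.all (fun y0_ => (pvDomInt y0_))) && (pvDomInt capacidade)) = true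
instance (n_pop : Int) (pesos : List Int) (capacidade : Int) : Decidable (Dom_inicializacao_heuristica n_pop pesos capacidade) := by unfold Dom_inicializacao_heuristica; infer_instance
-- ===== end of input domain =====

-- B builds the greedy individual once (prefix sum + early break) and copies it n_pop times; faster than A's per-individual re-sort.

-- ===== PORT A =====
def inicializacao_heuristica (n_pop : Int) (pesos : List Int) (capacidade : Int) : List (List Int) :=
  (PySem.List.pyRange 0 n_pop 1).foldl (fun populacao _ =>
    let ind : List Int := List.replicate pesos.length 0
    let indices : List Int :=
      PySem.List.sorted (PySem.List.pyRange 0 (pesos.length : Int) 1)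
        (fun i => PySem.List.pyGetD pesos i 0) false
    let r : List Int × Int := indices.foldl (fun st i =>
        if PySem.List.pyGetD pesos i 0 ≤ st.2 then
          (PySem.List.pySetD st.1 i 1, st.2 - PySem.List.pyGetD pesos i 0)
        else st) (ind, capacidade)
    populacao ++ [r.1]) []

-- ===== PORT B =====
-- the 'for i in indices: s += pesos[i]; if s > capacidade: break; base[i] = 1' loop of Source B
def pvAltFill (pesos : List Int) (capacidade : Int) : List Int → Int → List Int → List Int
  | [], _, base => base
  | i :: rest, s, base =>
      let s' := s + PySem.List.pyGetD pesos i 0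
      if s' > capacidade then base
      else pvAltFill pesos capacidade rest s' (PySem.List.pySetD base i 1)

def inicializacao_heuristica_alt (n_pop : Int) (pesos : List Int) (capacidade : Int) : List (List Int) :=
  let indices : List Int :=
    PySem.List.sorted (PySem.List.pyRange 0 (pesos.length : Int) 1)
      (fun i => PySem.List.pyGetD pesos i 0) false
  let base := pvAltFill pesos capacidade indices 0 (List.replicate pesos.length 0)
  (PySem.List.pyRange 0 n_pop 1).map (fun _ => base)  -- 'list(base)' copies; a pure List value needs no copy

-- ===== PRECONDITION & SPEC =====
def Spec_inicializacao_heuristica (n_pop : Int) (pesos : List Int) (capacidade : Int) (out : List (List Int)) : Prop := out = inicializacao_heuristica_alt n_pop pesos capacidade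
instance (n_pop : Int) (pesos : List Int) (capacidade : Int) (out : List (List Int)) : Decidable (Spec_inicializacao_heuristica n_pop pesos capacidade out) := by unfold Spec_inicializacao_heuristica; infer_instance

-- ===== CLAIM (what is proved, stated in full; the proofs are below) =====
def Claim_equal_inicializacao_heuristica : Prop := ∀ (n_pop : Int) (pesos : List Int) (capacidade : Int), Dom_inicializacao_heuristica n_pop pesos capacidade → Spec_inicializacao_heuristica n_pop pesos capacidade (inicializacao_heuristica n_pop pesos capacidade)

-- ===== LEMMAS AND PROOFS =====

-- If no element of l fits the remaining capacity, A's inner fold leaves the state unchanged.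
theorem pvSkipAll (pesos : List Int) (l : List Int) (st : List Int × Int)
    (h : ∀ j ∈ l, ¬ PySem.List.pyGetD pesos j 0 ≤ st.2) :
    l.foldl (fun st i =>
        if PySem.List.pyGetD pesos i 0 ≤ st.2 then
          (PySem.List.pySetD st.1 i 1, st.2 - PySem.List.pyGetD pesos i 0)
        else st) st = st := by
  induction l with
  | nil => rfl
  | cons i rest ih =>
      simp only [List.foldl_cons, if_neg (h i (List.mem_cons_self))]
      exact ih (fun j hj => h j (List.mem_cons_of_mem _ hj))

-- A's remaining-capacity fold equals B's prefix-sum fill on a weight-nondecreasing index list.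
theorem pvFill_eq (pesos : List Int) (capacidade : Int) :
    ∀ (l : List Int), (l.map (fun i => PySem.List.pyGetD pesos i 0)).Pairwise (· ≤ ·) →
    ∀ (base : List Int) (s : Int),
    (l.foldl (fun st i =>
        if PySem.List.pyGetD pesos i 0 ≤ st.2 then
          (PySem.List.pySetD st.1 i 1, st.2 - PySem.List.pyGetD pesos i 0)
        else st) (base, capacidade - s)).1
      = pvAltFill pesos capacidade l s base := by
  intro l
  induction l with
  | nil => intro _ base s; rfl
  | cons i rest ih =>
      intro hp base s
      rw [List.map_cons] at hp
      obtain ⟨h1, h2⟩ := List.pairwise_cons.mp hp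
      by_cases hfit : PySem.List.pyGetD pesos i 0 ≤ capacidade - s
      · have : capacidade - s - PySem.List.pyGetD pesos i 0
            = capacidade - (s + PySem.List.pyGetD pesos i 0) := by ring
        simp only [List.foldl_cons, pvAltFill, if_pos hfit,
          if_neg (by omega : ¬ s + PySem.List.pyGetD pesos i 0 > capacidade), this]
        exact ih h2 _ _
      · simp only [List.foldl_cons, pvAltFill, if_neg hfit,
          if_pos (by omega : s + PySem.List.pyGetD pesos i 0 > capacidade)]
        have hall : ∀ j ∈ rest, ¬ PySem.List.pyGetD pesos j 0 ≤ capacidade - s := by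
          intro j hj
          have := h1 _ (List.mem_map_of_mem hj)
          omega
        rw [pvSkipAll pesos rest (base, capacidade - s) hall]

-- ===== VERDICT (by name: the statement is the Claim_ definition above) =====
theorem inicializacao_heuristica_spec : Claim_equal_inicializacao_heuristica := by
  intro n_pop pesos capacidade _
  show _ = _
  unfold inicializacao_heuristica inicializacao_heuristica_alt
  rw [PySem.List.foldl_append_singleton_eq_map]
  simp only [List.nil_append]
  congr 1
  funext _
  have := pvFill_eq pesos capacidade
    (PySem.List.sorted (PySem.List.pyRange 0 (pesos.length : Int) 1)
      (fun i => PySem.List.pyGetD pesos i 0) false)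
    (PySem.List.sorted_map_key_pairwise _ _)
    (List.replicate pesos.length 0) 0
  simpa using this
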